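-- pv_equiv track=rewrite | github.com/Rivarrl/leetcode_python | extra/exam/huawei/t4.py | f
-- ===== SOURCE A (Python) =====
-- def f(arr, k):
--     n = len(arr)
--     l = [0] * n
--     tot = m = 0
--     for i, e in enumerate(arr):
--         l[i] = len(e)
--         tot += l[i]
--         m = max(m, l[i])
--     p = q = 0
--     res = [0] * tot
--     while p < m:
--         for i in range(n):
--             for x in range(k):
--                 j = p + x
--                 if j >= l[i]: continue
--                 res[q] = arr[i][j]
--                 q += 1
--         p += k
--     return ','.join([str(e) for e in res])
-- ===== SOURCE B (Python) =====
-- def f(arr, k):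
--     chunked = [[row[p:p + k] for p in range(0, len(row), k)] for row in arr]
--     maxb = max((len(c) for c in chunked), default=0)
--     res = []
--     for b in range(maxb):
--         for c in chunked:
--             if b < len(c):
--                 res.extend(c[b])
--     return ','.join(res)
-- ===== Notes on version B (the rewrite author's own statement) =====
-- stated objective: faster
-- what changed: A's index-arithmetic while/for/for nest probes every (row, block, offset-in-block) triple up to the longest row's block count; B precomputes each row's list of k-sized chunks (slices) and does a block-by-block transpose pass that only touches chunks that exist.
-- outside the precondition, e.g. on f(['', ''], 0): A returns '', B raises ValueError
import Mathlib
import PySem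

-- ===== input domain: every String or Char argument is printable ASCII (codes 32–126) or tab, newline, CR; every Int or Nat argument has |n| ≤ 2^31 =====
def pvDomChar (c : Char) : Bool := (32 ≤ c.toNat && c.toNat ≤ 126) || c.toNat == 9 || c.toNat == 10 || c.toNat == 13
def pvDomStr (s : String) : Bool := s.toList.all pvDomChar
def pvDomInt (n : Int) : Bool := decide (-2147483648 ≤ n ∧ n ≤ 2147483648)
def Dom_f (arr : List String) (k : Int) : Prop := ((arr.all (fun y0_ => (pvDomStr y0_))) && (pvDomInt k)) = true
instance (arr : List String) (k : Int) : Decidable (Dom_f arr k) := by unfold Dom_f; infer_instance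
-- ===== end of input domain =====

-- B replaces A's index-arithmetic while/for/for nest (which probes every row at every offset up to
-- the longest row) by a precomputed table of k-sized chunks per row and a block-by-block transpose
-- pass over existing chunks only (objective: faster; measured faster in a timing run).

-- ===== PORT A =====
-- Python's `res = [0]*tot; res[q] = …; q += 1` fills res strictly left to right and (under Pre_f)
-- writes exactly tot characters, so res is modeled as a char list grown by append; `tot` itself is
-- used by A only for that preallocation and is not ported.
def fInner (arr : List String) (k p : Int) (acc : List Char) : List Char :=
  arr.foldl (fun acc s =>
    (PySem.List.pyRange 0 k 1).foldl (fun acc x =>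
      if p + x ≥ PySem.Str.len s then acc
      else acc ++ (PySem.Str.pyGet? s (p + x)).toList) acc) acc

-- the `while p < m` loop; fuel m.toNat suffices: with k ≥ 1 the loop runs at most m times
def fLoop (arr : List String) (k m : Int) : Nat → Int → List Char → List Char
  | 0, _, acc => acc
  | fuel+1, p, acc => if p < m then fLoop arr k m fuel (p + k) (fInner arr k p acc) else acc

def f (arr : List String) (k : Int) : String :=
  let l := arr.map PySem.Str.len
  let m := l.foldl (fun a b => max a b) 0
  let res := fLoop arr k m m.toNat 0 []
  PySem.Str.join "," (res.map (fun c => String.ofList [c]))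

-- ===== PORT B =====
def f_alt (arr : List String) (k : Int) : String :=
  let chunked := arr.map (fun row =>
    (PySem.List.pyRange 0 (PySem.Str.len row) k).map (fun p => PySem.Str.slice row (some p) (some (p + k))))
  let maxb := chunked.foldl (fun a c => max a (c.length : Int)) 0
  let res := (PySem.List.pyRange 0 maxb 1).foldl (fun acc b =>
    chunked.foldl (fun acc c =>
      if b < (c.length : Int) then acc ++ (PySem.List.pyGetD c b "").toList else acc) acc) []
  PySem.Str.join "," (res.map (fun c => String.ofList [c]))

-- ===== PRECONDITION & SPEC =====
-- Pre_f admits k ≥ 1 plus the k ≤ 0 cases where A still terminates and B returns the same value: it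
-- excludes k ≤ 0 with a nonempty row (A's `while p < m` loop never terminates) and k = 0 with a
-- nonempty list of all-empty rows (A returns '' but B's range(0, 0, 0) raises ValueError).
def Pre_f (arr : List String) (k : Int) : Prop :=
  1 ≤ k ∨ ((∀ s ∈ arr, s = "") ∧ (k < 0 ∨ arr = []))
instance (arr : List String) (k : Int) : Decidable (Pre_f arr k) := by unfold Pre_f; infer_instance

def pvWitness_f : List String × Int := (["abcde", "xy", "", "123"], 2)

def Spec_f (arr : List String) (k : Int) (out : String) : Prop := out = f_alt arr k
instance (arr : List String) (k : Int) (out : String) : Decidable (Spec_f arr k out) := by unfold Spec_f; infer_instance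

-- ===== CLAIM (what is proved, stated in full; the proofs are below) =====
def Claim_equal_f : Prop := ∀ (arr : List String) (k : Int), Dom_f arr k → Pre_f arr k → Spec_f arr k (f arr k)

-- ===== LEMMAS AND PROOFS =====

-- the characters row cs contributes to the block starting at offset p
def blockRow (K : Nat) (cs : List Char) (p : Nat) : List Char := (cs.drop p).take K

def blockAll (K : Nat) (L : List (List Char)) (p : Nat) : List Char :=
  L.flatMap (fun cs => blockRow K cs p)

-- Nat-side mirror of A's while loop
def specLoop (K : Nat) (L : List (List Char)) (M : Nat) : Nat → Nat → List Char → List Char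
  | 0, _, acc => acc
  | fuel+1, p, acc => if p < M then specLoop K L M fuel (p + K) (acc ++ blockAll K L p) else acc

def ceilK (K n : Nat) : Nat := (n + K - 1) / K

lemma natRowLem (cs : List Char) (K pn : Nat) (acc : List Char) :
    (List.range K).foldl (fun acc x => if cs.length ≤ pn + x then acc else acc ++ (cs[pn + x]?).toList) acc
      = acc ++ (cs.drop pn).take K := by
  induction K with
  | zero => simp
  | succ K ih =>
    rw [List.range_succ, List.foldl_append, ih, List.take_add_one]
    by_cases h : cs.length ≤ pn + K
    · have hnone : (cs.drop pn)[K]? = none := by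
        rw [List.getElem?_eq_none_iff]
        simp only [List.length_drop]
        omega
      simp [h, hnone]
    · have h2 : (cs.drop pn)[K]? = cs[pn + K]? := by rw [List.getElem?_drop]
      simp [h, h2]

lemma rowLem (s : String) (k : Int) (pn : Nat) (acc : List Char) :
    (PySem.List.pyRange 0 k 1).foldl (fun acc x =>
        if (pn : Int) + x ≥ PySem.Str.len s then acc
        else acc ++ (PySem.Str.pyGet? s ((pn : Int) + x)).toList) acc
      = acc ++ (s.toList.drop pn).take k.toNat := by
  rw [PySem.List.pyRange_one, List.foldl_map]
  have h : (fun (acc : List Char) (n : Nat) =>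
        if (pn : Int) + (0 + (n : Int)) ≥ PySem.Str.len s then acc
        else acc ++ (PySem.Str.pyGet? s ((pn : Int) + (0 + (n : Int)))).toList)
      = (fun (acc : List Char) (n : Nat) =>
        if s.toList.length ≤ pn + n then acc else acc ++ (s.toList[pn + n]?).toList) := by
    funext acc n
    have hc : (pn : Int) + (0 + (n : Int)) = ((pn + n : Nat) : Int) := by push_cast; ring
    rw [hc, PySem.Str.len_eq, PySem.Str.pyGet?_natCast]
    simp only [ge_iff_le, Nat.cast_le]
  rw [h]
  have hk0 : (k - 0).toNat = k.toNat := by omega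
  rw [hk0, natRowLem]

lemma innerLem (arr : List String) (k : Int) (pn : Nat) (acc : List Char) :
    fInner arr k (pn : Int) acc = acc ++ blockAll k.toNat (arr.map String.toList) pn := by
  induction arr generalizing acc with
  | nil => simp [fInner, blockAll]
  | cons s arr ih =>
    show List.foldl _ (List.foldl _ acc (PySem.List.pyRange 0 k 1)) arr = _
    rw [rowLem s k pn acc]
    have hih := ih (acc ++ (s.toList.drop pn).take k.toNat)
    simp only [fInner] at hih
    rw [hih]
    simp [blockAll, blockRow]

lemma loopBridge (arr : List String) (k m : Int) (hk : 0 ≤ k) (hm : 0 ≤ m) :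
    ∀ (fuel : Nat) (pn : Nat) (acc : List Char),
      fLoop arr k m fuel (pn : Int) acc
        = specLoop k.toNat (arr.map String.toList) m.toNat fuel pn acc := by
  intro fuel
  induction fuel with
  | zero => intro pn acc; rfl
  | succ fuel ih =>
    intro pn acc
    show (if (pn : Int) < m then _ else _) = (if pn < m.toNat then _ else _)
    by_cases h : (pn : Int) < m
    · have h' : pn < m.toNat := by omega
      rw [if_pos h, if_pos h']
      have hcast : (pn : Int) + k = ((pn + k.toNat : Nat) : Int) := by omega
      rw [hcast, innerLem, ih]
    · have h' : ¬ pn < m.toNat := by omega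
      rw [if_neg h, if_neg h']

lemma maxFoldNat (l : List Nat) : ∀ (a : Nat),
    List.foldl (fun x y => max x y) ((a : Nat) : Int) (l.map (fun (n : Nat) => (n : Int)))
      = ((List.foldl max a l : Nat) : Int) := by
  induction l with
  | nil => intro a; rfl
  | cons n l ih =>
    intro a
    simp only [List.map_cons, List.foldl_cons]
    have hmax : max ((a : Nat) : Int) ((n : Nat) : Int) = ((max a n : Nat) : Int) := by omega
    rw [hmax, ih]

lemma ceilK_mono (K : Nat) : Monotone (ceilK K) := by
  intro a b hab
  exact Nat.div_le_div_right (by omega)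

lemma ceilK_max (K a b : Nat) : ceilK K (max a b) = max (ceilK K a) (ceilK K b) := by
  rcases le_total a b with h | h
  · rw [Nat.max_eq_right h, Nat.max_eq_right (ceilK_mono K h)]
  · rw [Nat.max_eq_left h, Nat.max_eq_left (ceilK_mono K h)]

lemma maxCeilFold (K : Nat) (l : List Nat) : ∀ (a : Nat),
    List.foldl (fun x n => max x (ceilK K n)) (ceilK K a) l
      = ceilK K (List.foldl max a l) := by
  induction l with
  | nil => intro a; rfl
  | cons n l ih =>
    intro a
    simp only [List.foldl_cons]
    rw [← ceilK_max, ih]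

lemma mul_lt_iff_lt_ceilK (K M b : Nat) (hK : 1 ≤ K) : b * K < M ↔ b < ceilK K M := by
  have h1 : b < ceilK K M ↔ (b + 1) * K ≤ M + K - 1 :=
    Nat.lt_iff_add_one_le.trans (Nat.le_div_iff_mul_le (by omega))
  have h2 : (b + 1) * K = b * K + K := by ring
  rw [h1, h2]
  omega

lemma ceilK_le_self (K M : Nat) (hK : 1 ≤ K) : ceilK K M ≤ M := by
  have hmul : M ≤ M * K := Nat.le_mul_of_pos_right M (by omega)
  have hlt : M + K - 1 < (M + 1) * K := by
    have : (M + 1) * K = M * K + K := by ring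
    omega
  have := (Nat.div_lt_iff_lt_mul (by omega : 0 < K)).mpr hlt
  unfold ceilK
  omega

lemma specLoopLem (K : Nat) (L : List (List Char)) (M : Nat) (hK : 1 ≤ K) :
    ∀ (fuel b : Nat) (acc : List Char), ceilK K M - b ≤ fuel →
      specLoop K L M fuel (b * K) acc
        = (List.range' b (ceilK K M - b)).foldl (fun acc bb => acc ++ blockAll K L (bb * K)) acc := by
  intro fuel
  induction fuel with
  | zero =>
    intro b acc hf
    have hz : ceilK K M - b = 0 := by omega
    rw [hz]
    rfl
  | succ fuel ih =>
    intro b acc hf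
    show (if b * K < M then _ else _) = _
    by_cases h : b * K < M
    · have hb : b < ceilK K M := (mul_lt_iff_lt_ceilK K M b hK).mp h
      have hsplit : ceilK K M - b = (ceilK K M - (b + 1)) + 1 := by omega
      rw [if_pos h, hsplit, List.range'_succ, List.foldl_cons]
      have hstep : b * K + K = (b + 1) * K := by ring
      rw [hstep, ih (b + 1) (acc ++ blockAll K L (b * K)) (by omega)]
    · have hb : ¬ b < ceilK K M := fun hb => h ((mul_lt_iff_lt_ceilK K M b hK).mpr hb)
      have hz : ceilK K M - b = 0 := by omega
      rw [if_neg h, hz]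
      rfl

-- ===== B-side lemmas =====

-- one row's chunk list, rewritten as a map over List.range of its chunk count
lemma chunkEq (s : String) (k : Int) (hk : 1 ≤ k) :
    (PySem.List.pyRange 0 (PySem.Str.len s) k).map (fun p => PySem.Str.slice s (some p) (some (p + k)))
      = (List.range (ceilK k.toNat s.toList.length)).map
          (fun j => PySem.Str.slice s (some ((j * k.toNat : Nat) : Int)) (some (((j * k.toNat : Nat) : Int) + k))) := by
  obtain ⟨K, rfl⟩ : ∃ K : Nat, k = (K : Int) := ⟨k.toNat, by omega⟩
  have hK : 1 ≤ K := by exact_mod_cast hk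
  simp only [Int.toNat_natCast]
  rw [PySem.List.pyRange_of_pos _ _ (by exact_mod_cast hK : (0:Int) < (K : Int)), List.map_map]
  have hcnt : (if (0:Int) < PySem.Str.len s then (((PySem.Str.len s) - 0 + (K : Int) - 1) / (K : Int)).toNat else 0)
      = ceilK K s.toList.length := by
    rw [PySem.Str.len_eq]
    by_cases h : (0 : Int) < (s.toList.length : Int)
    · rw [if_pos h]
      have hnum : ((s.toList.length : Int) - 0 + (K : Int) - 1) = ((s.toList.length + K - 1 : Nat) : Int) := by
        omega
      have hdiv : ((s.toList.length + K - 1 : Nat) : Int) / ((K : Nat) : Int)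
          = (((s.toList.length + K - 1) / K : Nat) : Int) := by
        exact_mod_cast rfl
      rw [hnum, hdiv, Int.toNat_natCast]
      rfl
    · rw [if_neg h]
      have hz : s.toList.length = 0 := by omega
      rw [hz]
      unfold ceilK
      rw [Nat.div_eq_of_lt (by omega)]
  rw [hcnt]
  apply List.map_congr_left
  intro j _
  have hidx : (0 : Int) + (K : Int) * (j : Int) = ((j * K : Nat) : Int) := by
    push_cast
    ring
  simp only [Function.comp]
  rw [hidx]

-- one row's contribution inside B's per-block fold equals blockRow
lemma rowChunkLem (s : String) (k : Int) (hk : 1 ≤ k) (b : Nat) (acc : List Char) :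
    (if (0 : Int) + (b : Int) <
        (((PySem.List.pyRange 0 (PySem.Str.len s) k).map
          (fun p => PySem.Str.slice s (some p) (some (p + k)))).length : Int)
      then acc ++ (PySem.List.pyGetD
          ((PySem.List.pyRange 0 (PySem.Str.len s) k).map
            (fun p => PySem.Str.slice s (some p) (some (p + k)))) ((0 : Int) + (b : Int)) "").toList
      else acc)
      = acc ++ blockRow k.toNat s.toList (b * k.toNat) := by
  rw [chunkEq s k hk]
  have hb0 : (0 : Int) + (b : Int) = ((b : Nat) : Int) := by omega
  rw [hb0, PySem.List.pyGetD_natCast]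
  rw [List.length_map, List.length_range]
  by_cases hb : b < ceilK k.toNat s.toList.length
  · have hcond : ((b : Nat) : Int) < ((ceilK k.toNat s.toList.length : Nat) : Int) := by
      exact_mod_cast hb
    rw [if_pos hcond]
    have hget : (List.getD ((List.range (ceilK k.toNat s.toList.length)).map
        (fun j => PySem.Str.slice s (some ((j * k.toNat : Nat) : Int)) (some (((j * k.toNat : Nat) : Int) + k)))) b "")
        = PySem.Str.slice s (some ((b * k.toNat : Nat) : Int)) (some (((b * k.toNat : Nat) : Int) + k)) := by
      rw [List.getD_eq_getElem?_getD, List.getElem?_map, List.getElem?_range hb]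
      rfl
    rw [hget]
    have hkk : ((b * k.toNat : Nat) : Int) + k = ((b * k.toNat : Nat) : Int) + ((k.toNat : Nat) : Int) := by
      omega
    have hsl : (PySem.Str.slice s (some ((b * k.toNat : Nat) : Int)) (some (((b * k.toNat : Nat) : Int) + k))).toList
        = blockRow k.toNat s.toList (b * k.toNat) := by
      rw [PySem.Str.toList_slice, PySem.Chars.slice_eq_listSlice, hkk,
        PySem.List.slice_natCast_add]
      rfl
    rw [hsl]
  · have hcond : ¬ ((b : Nat) : Int) < ((ceilK k.toNat s.toList.length : Nat) : Int) := by
      exact_mod_cast hb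
    rw [if_neg hcond]
    have hge : s.toList.length ≤ b * k.toNat := by
      have hnlt : ¬ (b * k.toNat < s.toList.length) :=
        fun hlt => hb ((mul_lt_iff_lt_ceilK k.toNat s.toList.length b (by omega)).mp hlt)
      omega
    have hz : blockRow k.toNat s.toList (b * k.toNat) = [] := by
      unfold blockRow
      rw [List.drop_eq_nil_of_le hge]
      simp
    rw [hz, List.append_nil]

-- B's per-block fold over all rows
lemma altBlockLem (arr : List String) (k : Int) (hk : 1 ≤ k) (b : Nat) (acc : List Char) :
    (arr.map (fun row =>
        (PySem.List.pyRange 0 (PySem.Str.len row) k).map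
          (fun p => PySem.Str.slice row (some p) (some (p + k))))).foldl
      (fun acc c => if (0 : Int) + (b : Int) < (c.length : Int)
        then acc ++ (PySem.List.pyGetD c ((0 : Int) + (b : Int)) "").toList else acc) acc
      = acc ++ blockAll k.toNat (arr.map String.toList) (b * k.toNat) := by
  induction arr generalizing acc with
  | nil => simp [blockAll]
  | cons s arr ih =>
    simp only [List.map_cons, List.foldl_cons]
    rw [rowChunkLem s k hk b acc, ih]
    simp [blockAll]

-- ===== assembled result lists =====

lemma aRes (arr : List String) (k : Int) (hk : 1 ≤ k) :
    fLoop arr k ((arr.map PySem.Str.len).foldl (fun a b => max a b) 0)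
        ((arr.map PySem.Str.len).foldl (fun a b => max a b) 0).toNat 0 []
      = (List.range (ceilK k.toNat
            (((arr.map String.toList).map List.length).foldl max 0))).foldl
          (fun acc bb => acc ++ blockAll k.toNat (arr.map String.toList) (bb * k.toNat)) [] := by
  have hlens : arr.map PySem.Str.len
      = (((arr.map String.toList).map List.length).map (fun (n : Nat) => (n : Int))) := by
    simp [PySem.Str.len_eq, List.map_map, Function.comp]
  set M : Nat := ((arr.map String.toList).map List.length).foldl max 0 with hM
  have hm : (arr.map PySem.Str.len).foldl (fun a b => max a b) 0 = ((M : Nat) : Int) := by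
    rw [hlens]
    exact maxFoldNat _ 0
  have hm0 : (0 : Int) ≤ (arr.map PySem.Str.len).foldl (fun a b => max a b) 0 := by
    rw [hm]; positivity
  have htn : ((arr.map PySem.Str.len).foldl (fun a b => max a b) 0).toNat = M := by
    rw [hm]; omega
  have step1 : fLoop arr k ((arr.map PySem.Str.len).foldl (fun a b => max a b) 0) M 0 []
      = specLoop k.toNat (arr.map String.toList) M M 0 [] := by
    have h1 := loopBridge arr k _ (by omega) hm0 M 0 []
    rw [htn] at h1
    exact h1
  have step2 : specLoop k.toNat (arr.map String.toList) M M 0 []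
      = (List.range (ceilK k.toNat M)).foldl
          (fun acc bb => acc ++ blockAll k.toNat (arr.map String.toList) (bb * k.toNat)) [] := by
    have h2 := specLoopLem k.toNat (arr.map String.toList) M (by omega) M 0 []
      (by simpa using ceilK_le_self k.toNat M (by omega))
    rw [Nat.zero_mul, Nat.sub_zero] at h2
    rw [h2, ← List.range_eq_range']
  rw [htn, step1, step2]

lemma bRes (arr : List String) (k : Int) (hk : 1 ≤ k) :
    (PySem.List.pyRange 0
        ((arr.map (fun row =>
          (PySem.List.pyRange 0 (PySem.Str.len row) k).map
            (fun p => PySem.Str.slice row (some p) (some (p + k))))).foldl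
          (fun a c => max a (c.length : Int)) 0) 1).foldl
      (fun acc b =>
        (arr.map (fun row =>
          (PySem.List.pyRange 0 (PySem.Str.len row) k).map
            (fun p => PySem.Str.slice row (some p) (some (p + k))))).foldl
          (fun acc c => if b < (c.length : Int) then acc ++ (PySem.List.pyGetD c b "").toList else acc) acc) []
      = (List.range (ceilK k.toNat
            (((arr.map String.toList).map List.length).foldl max 0))).foldl
          (fun acc bb => acc ++ blockAll k.toNat (arr.map String.toList) (bb * k.toNat)) [] := by
  have hmaxb : (arr.map (fun row =>
        (PySem.List.pyRange 0 (PySem.Str.len row) k).map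
          (fun p => PySem.Str.slice row (some p) (some (p + k))))).foldl
        (fun a c => max a (c.length : Int)) 0
      = ((ceilK k.toNat (((arr.map String.toList).map List.length).foldl max 0) : Nat) : Int) := by
    rw [List.foldl_map]
    have h1 : (fun (a : Int) (row : String) => max a
        ((((PySem.List.pyRange 0 (PySem.Str.len row) k).map
          (fun p => PySem.Str.slice row (some p) (some (p + k)))).length : Int)))
        = (fun (a : Int) (row : String) => max a ((ceilK k.toNat row.toList.length : Nat) : Int)) := by
      funext a row
      rw [chunkEq row k hk, List.length_map, List.length_range]
    rw [h1]
    have h2 : arr.foldl (fun (a : Int) (row : String) => max a ((ceilK k.toNat row.toList.length : Nat) : Int)) 0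
        = ((arr.map String.toList).map List.length).foldl (fun a n => max a ((ceilK k.toNat n : Nat) : Int)) 0 := by
      rw [List.map_map, List.foldl_map]
      rfl
    rw [h2]
    have h3 : ∀ (l : List Nat) (a : Nat),
        l.foldl (fun (x : Int) (n : Nat) => max x ((ceilK k.toNat n : Nat) : Int)) ((a : Nat) : Int)
          = ((l.foldl (fun x n => max x (ceilK k.toNat n)) a : Nat) : Int) := by
      intro l
      induction l with
      | nil => intro a; rfl
      | cons n l ih =>
        intro a
        simp only [List.foldl_cons]
        have hmx : max ((a : Nat) : Int) ((ceilK k.toNat n : Nat) : Int)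
            = ((max a (ceilK k.toNat n) : Nat) : Int) := by omega
        rw [hmx, ih]
    have h4 : ((arr.map String.toList).map List.length).foldl
          (fun (a : Int) (n : Nat) => max a ((ceilK k.toNat n : Nat) : Int)) 0
        = ((((arr.map String.toList).map List.length).foldl
            (fun x n => max x (ceilK k.toNat n)) 0 : Nat) : Int) :=
      h3 ((arr.map String.toList).map List.length) 0
    have h5 : ceilK k.toNat 0 = 0 := by
      unfold ceilK
      rw [Nat.div_eq_of_lt (by omega)]
    have h6 := maxCeilFold k.toNat ((arr.map String.toList).map List.length) 0
    rw [h5] at h6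
    rw [h4, h6]
  rw [hmaxb, PySem.List.pyRange_one, List.foldl_map]
  have hcnt : ((((ceilK k.toNat (((arr.map String.toList).map List.length).foldl max 0) : Nat) : Int)) - 0).toNat
      = ceilK k.toNat (((arr.map String.toList).map List.length).foldl max 0) := by omega
  rw [hcnt]
  have hfun : (fun (acc : List Char) (b : Nat) =>
        (arr.map (fun row =>
          (PySem.List.pyRange 0 (PySem.Str.len row) k).map
            (fun p => PySem.Str.slice row (some p) (some (p + k))))).foldl
          (fun acc c => if (0 : Int) + (b : Int) < (c.length : Int)
            then acc ++ (PySem.List.pyGetD c ((0 : Int) + (b : Int)) "").toList else acc) acc)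
      = (fun (acc : List Char) (bb : Nat) =>
          acc ++ blockAll k.toNat (arr.map String.toList) (bb * k.toNat)) := by
    funext acc b
    exact altBlockLem arr k hk b acc
  rw [hfun]

-- degenerate inputs: every row is empty (or arr = []), so both sides produce the empty result list
lemma foldMaxZero (l : List Int) (h : ∀ x ∈ l, x = 0) : ∀ (a : Int), 0 ≤ a →
    l.foldl (fun p q => max p q) a = a := by
  induction l with
  | nil => intro a _; rfl
  | cons n l ih =>
    intro a ha
    simp only [List.foldl_cons]
    have hn : n = 0 := h n (by simp)
    have : max a n = a := by omega
    rw [this]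
    exact ih (fun x hx => h x (by simp [hx])) a ha

lemma foldMaxConstZero {α : Type} (l : List α) : ∀ (a : Int), 0 ≤ a →
    l.foldl (fun p (_ : α) => max p (0 : Int)) a = a := by
  induction l with
  | nil => intro a _; rfl
  | cons x l ih =>
    intro a ha
    simp only [List.foldl_cons]
    have hmx : max a (0 : Int) = a := by omega
    rw [hmx]
    exact ih a ha

lemma pyRange_zero_step (k : Int) : PySem.List.pyRange 0 0 k = [] := by
  simp [PySem.List.pyRange]

theorem f_spec : Claim_equal_f := by
  intro arr k _ hpre
  simp only [Spec_f, f, f_alt]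
  rcases hpre with hk | ⟨hemp, hdeg⟩
  · -- main case: k ≥ 1
    rw [aRes arr k hk, ← bRes arr k hk]
  · -- degenerate case: all rows empty and (k < 0 or arr = [])
    have hlen : ∀ s ∈ arr, PySem.Str.len s = 0 := by
      intro s hs
      rw [hemp s hs]
      rfl
    have hm : (arr.map PySem.Str.len).foldl (fun a b => max a b) 0 = 0 := by
      apply foldMaxZero
      · intro x hx
        rcases List.mem_map.mp hx with ⟨s, hs, rfl⟩
        exact hlen s hs
      · omega
    have hA : fLoop arr k ((arr.map PySem.Str.len).foldl (fun a b => max a b) 0)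
        ((arr.map PySem.Str.len).foldl (fun a b => max a b) 0).toNat 0 [] = [] := by
      rw [hm]
      rfl
    have hchunk : arr.map (fun row =>
        (PySem.List.pyRange 0 (PySem.Str.len row) k).map
          (fun p => PySem.Str.slice row (some p) (some (p + k))))
        = arr.map (fun _ => []) := by
      apply List.map_congr_left
      intro row hrow
      rw [hlen row hrow, pyRange_zero_step]
      rfl
    have hmaxb : (arr.map (fun row =>
        (PySem.List.pyRange 0 (PySem.Str.len row) k).map
          (fun p => PySem.Str.slice row (some p) (some (p + k))))).foldl
        (fun a c => max a (c.length : Int)) 0 = 0 := by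
      rw [hchunk, List.foldl_map]
      simp only [List.length_nil, Nat.cast_zero]
      exact foldMaxConstZero arr 0 le_rfl
    have hB : (PySem.List.pyRange 0
        ((arr.map (fun row =>
          (PySem.List.pyRange 0 (PySem.Str.len row) k).map
            (fun p => PySem.Str.slice row (some p) (some (p + k))))).foldl
          (fun a c => max a (c.length : Int)) 0) 1).foldl
        (fun acc b =>
          (arr.map (fun row =>
            (PySem.List.pyRange 0 (PySem.Str.len row) k).map
              (fun p => PySem.Str.slice row (some p) (some (p + k))))).foldl
            (fun acc c => if b < (c.length : Int) then acc ++ (PySem.List.pyGetD c b "").toList else acc) acc) []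
        = [] := by
      rw [hmaxb, pyRange_zero_step]
      rfl
    rw [hA, hB]
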